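-- pv_equiv track=rewrite | github.com/syn-ack42/aoc2017 | src/d09.py | split_subgroups
-- ===== SOURCE A (Python) =====
-- def split_subgroups(inp):
--     subgrps = []
--     b_level = 0
--
--     buf = []
--     for c in inp:
--         if c == "{":
--             b_level +=1
--         elif c == "}":
--             b_level -= 1
--         elif (c == ",") and b_level == 0:
--             subgrps.append("".join(buf))
--             buf = []
--             continue
--         buf.append(c)
--     subgrps.append("".join(buf))
--
--     return subgrps
-- ===== SOURCE B (Python) =====
-- def split_subgroups(inp):
--     # Pass 1: record positions of top-level commas (depth 0).
--     depth = 0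
--     cuts = []
--     for i, c in enumerate(inp):
--         if c == "{":
--             depth += 1
--         elif c == "}":
--             depth -= 1
--         elif c == "," and depth == 0:
--             cuts.append(i)
--     # Pass 2: slice the string at the recorded positions.
--     parts = []
--     start = 0
--     for p in cuts:
--         parts.append(inp[start:p])
--         start = p + 1
--     parts.append(inp[start:])
--     return parts
-- ===== Notes on version B (the rewrite author's own statement) =====
-- stated objective: alternative
-- what changed: B replaces A's single pass with a growing per-segment character buffer by two passes: first record the indices of all depth-0 commas, then rebuild the parts by slicing the input at those indices.
import Mathlib
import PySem

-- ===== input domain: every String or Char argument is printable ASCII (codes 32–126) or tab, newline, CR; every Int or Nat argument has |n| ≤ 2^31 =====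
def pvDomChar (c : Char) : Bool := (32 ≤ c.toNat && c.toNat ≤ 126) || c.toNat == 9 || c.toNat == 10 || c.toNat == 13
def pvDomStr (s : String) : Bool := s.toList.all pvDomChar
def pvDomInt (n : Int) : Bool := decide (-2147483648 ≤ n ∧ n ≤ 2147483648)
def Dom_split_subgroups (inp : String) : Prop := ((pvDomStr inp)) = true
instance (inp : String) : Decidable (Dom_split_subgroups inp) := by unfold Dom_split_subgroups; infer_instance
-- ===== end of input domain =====

-- B re-implements the top-level split as two passes (collect top-level comma positions, then slice);
-- objective: a different decomposition of the same O(n) task (index list + slicing instead of a growing buffer).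

-- ===== PORT A =====
-- one pass; state = (subgrps, b_level, buf)
def stepA (st : List String × Int × List Char) (c : Char) : List String × Int × List Char :=
  if c = '{' then (st.1, st.2.1 + 1, st.2.2 ++ [c])
  else if c = '}' then (st.1, st.2.1 - 1, st.2.2 ++ [c])
  else if c = ',' ∧ st.2.1 = 0 then (st.1 ++ [String.mk st.2.2], st.2.1, ([] : List Char))
  else (st.1, st.2.1, st.2.2 ++ [c])

def split_subgroups (inp : String) : List String :=
  let st := inp.toList.foldl stepA ([], 0, [])
  st.1 ++ [String.mk st.2.2]

-- ===== PORT B =====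
-- pass 1: depth-tracking scan over enumerate, recording indices of depth-0 commas
def stepB1 (st : Int × List Int) (ic : Int × Char) : Int × List Int :=
  if ic.2 = '{' then (st.1 + 1, st.2)
  else if ic.2 = '}' then (st.1 - 1, st.2)
  else if ic.2 = ',' ∧ st.1 = 0 then (st.1, st.2 ++ [ic.1])
  else st

-- pass 2: rebuild the parts by slicing at the recorded positions (inp[start:p], start := p+1)
def stepB2 (cs : List Char) (st : List String × Int) (p : Int) : List String × Int :=
  (st.1 ++ [String.mk (PySem.List.slice cs (some st.2) (some p))], p + 1)

def split_subgroups_alt (inp : String) : List String :=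
  let cs := inp.toList
  let p1 := (PySem.List.enumerate cs 0).foldl stepB1 (0, [])
  let p2 := p1.2.foldl (stepB2 cs) ([], 0)
  p2.1 ++ [String.mk (PySem.List.slice cs (some p2.2) none)]

-- ===== PRECONDITION & SPEC =====
def Spec_split_subgroups (inp : String) (out : List String) : Prop := out = split_subgroups_alt inp
instance (inp : String) (out : List String) : Decidable (Spec_split_subgroups inp out) := by unfold Spec_split_subgroups; infer_instance

-- ===== CLAIM (what is proved, stated in full; the proofs are below) =====
def Claim_equal_split_subgroups : Prop := ∀ (inp : String), Dom_split_subgroups inp → Spec_split_subgroups inp (split_subgroups inp)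

-- ===== LEMMAS AND PROOFS =====

-- reference splitter: sp d cs = the top-level split of cs starting at depth d
def spStep (c : Char) (d : Int) : Int := if c = '{' then d + 1 else if c = '}' then d - 1 else d

def sp : Int → List Char → List (List Char)
  | _, [] => [[]]
  | d, c :: cs =>
    if c = ',' ∧ d = 0 then [] :: sp d cs
    else
      match sp (spStep c d) cs with
      | [] => [[c]]
      | h :: t => (c :: h) :: t

def consHead (buf : List Char) : List (List Char) → List (List Char)
  | [] => [buf]
  | h :: t => (buf ++ h) :: t

-- cut positions: indices (starting at i) of depth-0 commas
def cutsAux : Int → Int → List Char → List Int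
  | _, _, [] => []
  | d, i, c :: cs =>
    if c = '{' then cutsAux (d + 1) (i + 1) cs
    else if c = '}' then cutsAux (d - 1) (i + 1) cs
    else if c = ',' ∧ d = 0 then i :: cutsAux d (i + 1) cs
    else cutsAux d (i + 1) cs

theorem sp_ne_nil (d : Int) (cs : List Char) : sp d cs ≠ [] := by
  cases cs with
  | nil => simp [sp]
  | cons c cs =>
    simp only [sp]
    split
    · simp
    · cases sp (spStep c d) cs <;> simp

theorem la (cs : List Char) : ∀ (acc : List String) (d : Int) (buf : List Char),
    (cs.foldl stepA (acc, d, buf)).1 ++ [String.mk (cs.foldl stepA (acc, d, buf)).2.2]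
      = acc ++ (consHead buf (sp d cs)).map String.mk := by
  induction cs with
  | nil => intro acc d buf; simp [sp, consHead]
  | cons c cs ih =>
    intro acc d buf
    by_cases h1 : c = '{'
    · obtain ⟨h, t, hsp⟩ := List.exists_cons_of_ne_nil (sp_ne_nil (spStep c d) cs)
      simp [spStep, h1] at hsp
      simp only [List.foldl_cons, stepA, h1, if_pos rfl, ih, sp, spStep]
      simp [h1, hsp, consHead]
    · by_cases h2 : c = '}'
      · obtain ⟨h, t, hsp⟩ := List.exists_cons_of_ne_nil (sp_ne_nil (spStep c d) cs)
        simp [spStep, h1, h2] at hsp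
        simp only [List.foldl_cons, stepA, h1, h2, if_neg, if_pos rfl, ih, sp, spStep]
        simp [h1, h2, hsp, consHead]
      · by_cases h3 : c = ',' ∧ d = 0
        · simp only [List.foldl_cons, stepA, h1, h2, if_neg, if_pos h3, ih, sp]
          obtain ⟨h, t, hsp⟩ := List.exists_cons_of_ne_nil (sp_ne_nil d cs)
          rw [h3.2] at hsp
          simp [h3, hsp, consHead]
        · obtain ⟨h, t, hsp⟩ := List.exists_cons_of_ne_nil (sp_ne_nil (spStep c d) cs)
          simp [spStep, h1, h2] at hsp
          simp only [List.foldl_cons, stepA, h1, h2, if_neg, if_neg h3, ih, sp, spStep]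
          simp [h1, h2, h3, hsp, consHead]

theorem lb1 (cs : List Char) : ∀ (i d : Int) (acc : List Int),
    ((PySem.List.enumerate cs i).foldl stepB1 (d, acc)).2 = acc ++ cutsAux d i cs := by
  induction cs with
  | nil => intro i d acc; simp [PySem.List.enumerate_nil, cutsAux]
  | cons c cs ih =>
    intro i d acc
    rw [PySem.List.enumerate_cons, List.foldl_cons]
    by_cases h1 : c = '{'
    · rw [show stepB1 (d, acc) (i, c) = (d + 1, acc) by simp [stepB1, h1], ih]
      simp [cutsAux, h1]
    · by_cases h2 : c = '}'
      · rw [show stepB1 (d, acc) (i, c) = (d - 1, acc) by simp [stepB1, h1, h2], ih]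
        simp [cutsAux, h1, h2]
      · by_cases h3 : c = ',' ∧ d = 0
        · rw [show stepB1 (d, acc) (i, c) = (d, acc ++ [i]) by simp [stepB1, h1, h2, h3], ih]
          simp [cutsAux, h1, h2, h3]
        · rw [show stepB1 (d, acc) (i, c) = (d, acc) by simp [stepB1, h1, h2, h3], ih]
          simp [cutsAux, h1, h2, h3]

-- the (n+1)-prefix of a buffer extends the n-prefix by full[n]
theorem seg_succ (full : List Char) (m n : Nat) (c : Char) (cs : List Char)
    (hd : full.drop n = c :: cs) (hmn : m ≤ n) :
    (full.drop m).take (n + 1 - m) = (full.drop m).take (n - m) ++ [c] := by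
  have hn : full[n]? = some c := by
    have h0 : (full.drop n)[0]? = full[n + 0]? := List.getElem?_drop
    rw [hd] at h0
    simpa using h0.symm
  have h1 : n + 1 - m = (n - m) + 1 := by omega
  have h2 : (full.drop m)[n - m]? = some c := by
    rw [List.getElem?_drop]
    have : m + (n - m) = n := by omega
    rw [this, hn]
  rw [h1, List.take_succ, h2]
  simp

theorem lb2 (full : List Char) : ∀ (cs : List Char) (n m : Nat) (d : Int) (parts : List String),
    full.drop n = cs → m ≤ n →
    ((cutsAux d (n : Int) cs).foldl (stepB2 full) (parts, (m : Int))).1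
        ++ [String.mk (PySem.List.slice full
              (some ((cutsAux d (n : Int) cs).foldl (stepB2 full) (parts, (m : Int))).2) none)]
      = parts ++ (consHead ((full.drop m).take (n - m)) (sp d cs)).map String.mk := by
  intro cs
  induction cs with
  | nil =>
    intro n m d parts hd hmn
    have hlen : full.length ≤ n := by
      by_contra h
      have : full.drop n ≠ [] := by
        apply List.ne_nil_of_length_pos
        rw [List.length_drop]; omega
      exact this hd
    have htake : (full.drop m).take (n - m) = full.drop m := by
      apply List.take_of_length_le
      rw [List.length_drop]; omega
    simp only [cutsAux, List.foldl_nil, sp, consHead]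
    rw [PySem.List.slice_from _ (by positivity)]
    simp [htake]
  | cons c cs ih =>
    intro n m d parts hd hmn
    have hn : n < full.length := by
      by_contra h
      have : full.drop n = [] := List.drop_eq_nil_of_le (by omega)
      rw [this] at hd; exact absurd hd (by simp)
    have hd' : full.drop (n + 1) = cs := by
      have hdd : List.drop 1 (List.drop n full) = List.drop (n + 1) full := List.drop_drop
      rw [← hdd, hd]; simp
    by_cases h3 : c = ',' ∧ d = 0
    · have h1 : c ≠ '{' := by rintro rfl; simp at h3
      have h2 : c ≠ '}' := by rintro rfl; simp at h3
      simp only [cutsAux, if_neg h1, if_neg h2, if_pos h3, List.foldl_cons, stepB2]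
      have hcast : (n : Int) + 1 = ((n + 1 : Nat) : Int) := by push_cast; ring
      rw [hcast, ih (n + 1) (n + 1) d _ hd' (le_refl _)]
      rw [PySem.List.slice_toNat _ (by positivity) (by positivity)]
      simp only [Int.toNat_natCast]
      obtain ⟨h, t, hsp⟩ := List.exists_cons_of_ne_nil (sp_ne_nil d cs)
      rw [h3.2] at hsp
      simp [sp, h3, hsp, consHead]
    · -- depth update, char goes into the current segment
      have hseg := seg_succ full m n c cs hd hmn
      have hcuts : cutsAux d (n : Int) (c :: cs) = cutsAux (spStep c d) ((n : Int) + 1) cs := by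
        by_cases h1 : c = '{'
        · simp [cutsAux, h1, spStep]
        · by_cases h2 : c = '}'
          · simp [cutsAux, h1, h2, spStep]
          · simp [cutsAux, h1, h2, h3, spStep]
      have hcast : (n : Int) + 1 = ((n + 1 : Nat) : Int) := by push_cast; ring
      rw [hcuts, hcast, ih (n + 1) m (spStep c d) parts hd' (by omega)]
      obtain ⟨h, t, hsp⟩ := List.exists_cons_of_ne_nil (sp_ne_nil (spStep c d) cs)
      simp [sp, h3, hsp, consHead, hseg]

-- ===== VERDICT (by name: the statement is the Claim_ definition above) =====
theorem split_subgroups_spec : Claim_equal_split_subgroups := by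
  intro inp _
  show split_subgroups inp = split_subgroups_alt inp
  have hA := la inp.toList [] 0 []
  have hB2 := lb2 inp.toList inp.toList 0 0 0 [] (by simp) (le_refl 0)
  simp only [Nat.cast_zero, Nat.sub_zero, List.drop_zero, List.take_zero, List.nil_append]
    at hA hB2
  simp only [split_subgroups, split_subgroups_alt]
  rw [lb1 inp.toList 0 0 [], List.nil_append, hA, hB2]
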